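-- pv_equiv track=rewrite | github.com/0xPuddi/Algorithms | src/algorithms/array_uniform_pairing.py | pairing_solution
-- ===== SOURCE A (Python) =====
-- def pairing_solution(A: list[int], P: list[(int, int)]):
--     if len(P) == 0:
--         return False
--
--     S = {}
--     for i in range(len(A)):
--         if A[i] not in S:
--             S[A[i]] = 1
--         else:
--             S[A[i]] += 1
--
--     for i in range(len(P)):
--         if P[i][0] in S:
--             S[P[i][0]] -= 1
--
--         if P[i][1] in S:
--             S[P[i][1]] -= 1
--
--     for s in S:
--         if S[s] != 0:
--             return False
--
--     uniform_sum = P[0][0] + P[0][1]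
--     for i in range(len(P)):
--         if uniform_sum != (P[i][0] + P[i][1]):
--             return False
--
--     return True
-- ===== SOURCE B (Python) =====
-- def pairing_solution(A: list[int], P: list[(int, int)]):
--     if len(P) == 0:
--         return False
--
--     Aset = set(A)
--     filtered = [x for pair in P for x in pair if x in Aset]
--     if sorted(A) != sorted(filtered):
--         return False
--
--     uniform_sum = P[0][0] + P[0][1]
--     return all(a + b == uniform_sum for (a, b) in P)
-- ===== Notes on version B (the rewrite author's own statement) =====
-- stated objective: simpler
-- what changed: Replaces the mutable count-dict (build, decrement per pair element, scan for non-zero) with one sorted-multiset comparison: sorted(A) == sorted(pair elements that occur in set(A)).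
import Mathlib
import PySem

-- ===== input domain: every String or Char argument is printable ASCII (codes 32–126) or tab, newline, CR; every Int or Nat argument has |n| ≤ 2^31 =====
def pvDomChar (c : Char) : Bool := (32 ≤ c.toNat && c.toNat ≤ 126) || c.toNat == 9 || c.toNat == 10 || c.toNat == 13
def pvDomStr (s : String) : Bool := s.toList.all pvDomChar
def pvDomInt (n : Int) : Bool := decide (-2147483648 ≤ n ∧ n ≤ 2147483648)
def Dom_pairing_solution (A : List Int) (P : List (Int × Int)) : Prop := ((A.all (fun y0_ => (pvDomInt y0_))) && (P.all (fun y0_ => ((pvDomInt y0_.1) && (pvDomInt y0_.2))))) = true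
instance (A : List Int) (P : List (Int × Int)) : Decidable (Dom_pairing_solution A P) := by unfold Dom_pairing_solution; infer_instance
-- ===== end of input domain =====

-- B replaces A's mutable count-dict (build, decrement per pair element, scan for non-zero)
-- with one sorted-multiset comparison against the pair elements occurring in set(A); simpler.

-- ===== PORT A =====
def pairing_solution (A : List Int) (P : List (Int × Int)) : Bool :=
  if P.length == 0 then false
  else
    let S := A.foldl (fun S a =>
      if !S.contains a then S.insert a 1
      else S.insert a ((S.get? a).getD 0 + 1)) (PySem.Dict.empty : PySem.Dict Int Int)
    let S := P.foldl (fun S p =>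
      let S := if S.contains p.1 then S.insert p.1 ((S.get? p.1).getD 0 - 1) else S
      if S.contains p.2 then S.insert p.2 ((S.get? p.2).getD 0 - 1) else S) S
    if S.items.any (fun kv => !(kv.2 == 0)) then false
    else
      let uniform_sum := (PySem.List.pyGetD P 0 (0, 0)).1 + (PySem.List.pyGetD P 0 (0, 0)).2
      if P.any (fun p => !(uniform_sum == p.1 + p.2)) then false else true

-- ===== PORT B =====
def pairing_solution_alt (A : List Int) (P : List (Int × Int)) : Bool :=
  if P.length == 0 then false
  else
    let Aset := PySem.Set.ofList A
    let filtered := P.foldl (fun acc p => acc ++ [p.1, p.2].filter (fun x => Aset.contains x)) []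
    if !(PySem.List.sorted A (fun x => x) == PySem.List.sorted filtered (fun x => x)) then false
    else
      let uniform_sum := (PySem.List.pyGetD P 0 (0, 0)).1 + (PySem.List.pyGetD P 0 (0, 0)).2
      P.all (fun p => p.1 + p.2 == uniform_sum)

-- ===== PRECONDITION & SPEC =====
def Spec_pairing_solution (A : List Int) (P : List (Int × Int)) (out : Bool) : Prop := out = pairing_solution_alt A P
instance (A : List Int) (P : List (Int × Int)) (out : Bool) : Decidable (Spec_pairing_solution A P out) := by unfold Spec_pairing_solution; infer_instance

-- ===== CLAIM (what is proved, stated in full; the proofs are below) =====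
def Claim_equal_pairing_solution : Prop := ∀ (A : List Int) (P : List (Int × Int)), Dom_pairing_solution A P → Spec_pairing_solution A P (pairing_solution A P)

-- ===== LEMMAS AND PROOFS =====

-- A's first loop is exactly Counter(A)
lemma count_loop_eq_counter (A : List Int) :
    A.foldl (fun S a =>
      if !S.contains a then S.insert a 1
      else S.insert a ((S.get? a).getD 0 + 1)) (PySem.Dict.empty : PySem.Dict Int Int)
    = PySem.Dict.counter A := by
  have h : (fun (S : PySem.Dict Int Int) a =>
      if !S.contains a then S.insert a 1
      else S.insert a ((S.get? a).getD 0 + 1))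
      = (fun d x => d.insert x (d.getD x 0 + 1)) := by
    funext S a
    cases hc : S.contains a
    · simp [PySem.Dict.getD_of_not_contains S 0 hc]
    · simp [PySem.Dict.getD_eq_get?_getD]
  rw [h, PySem.Dict.foldl_insert_getD_add_one_eq_counter]

-- the body of A's second (decrement) loop, named for the lemmas below
def decStep (S : PySem.Dict Int Int) (p : Int × Int) : PySem.Dict Int Int :=
  let S := if S.contains p.1 then S.insert p.1 ((S.get? p.1).getD 0 - 1) else S
  if S.contains p.2 then S.insert p.2 ((S.get? p.2).getD 0 - 1) else S

lemma keys_decStep (S : PySem.Dict Int Int) (p : Int × Int) : (decStep S p).keys = S.keys := by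
  unfold decStep
  cases hc1 : S.contains p.1 <;> simp only [hc1, Bool.false_eq_true, if_true, if_false]
  · cases hc2 : S.contains p.2 <;> simp [hc2, PySem.Dict.keys_insert_of_contains]
  · cases hc2 : (S.insert p.1 ((S.get? p.1).getD 0 - 1)).contains p.2 <;>
      simp [hc2, PySem.Dict.keys_insert_of_contains, PySem.Dict.keys_insert_of_contains _ _ hc1]

lemma contains_decStep (S : PySem.Dict Int Int) (p : Int × Int) (x : Int) :
    (decStep S p).contains x = S.contains x := by
  rw [PySem.Dict.contains_eq_decide_mem_keys, PySem.Dict.contains_eq_decide_mem_keys, keys_decStep]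

lemma getD_decStep (S : PySem.Dict Int Int) (p : Int × Int) (v : Int) :
    (decStep S p).getD v 0
      = S.getD v 0 - (([p.1, p.2].filter (fun x => S.contains x)).count v : Int) := by
  have e1 : ∀ (d : PySem.Dict Int Int) k, (d.get? k).getD 0 = d.getD k 0 :=
    fun d k => (PySem.Dict.getD_eq_get?_getD d k 0).symm
  unfold decStep
  simp only [e1]
  cases hc1 : S.contains p.1 <;> cases hc2 : S.contains p.2 <;>
    simp only [hc1, hc2, if_true, if_false, Bool.false_eq_true, if_neg, if_pos,
      PySem.Dict.contains_insert, PySem.Dict.getD_insert, List.filter_cons, List.filter_nil,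
      Bool.or_true, Bool.or_false, List.count_cons, List.count_nil] <;>
    (try split_ifs) <;> simp_all [PySem.Dict.getD_insert, List.count_cons, beq_iff_eq] <;> omega

lemma keys_decLoop (l : List (Int × Int)) (S : PySem.Dict Int Int) :
    (l.foldl decStep S).keys = S.keys := by
  induction l generalizing S with
  | nil => rfl
  | cons p t ih => rw [List.foldl_cons, ih, keys_decStep]

lemma getD_decLoop (l : List (Int × Int)) (S : PySem.Dict Int Int) (v : Int) :
    (l.foldl decStep S).getD v 0
      = S.getD v 0 - ((l.flatMap (fun p => [p.1, p.2].filter (fun x => S.contains x))).count v : Int) := by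
  induction l generalizing S with
  | nil => simp
  | cons p t ih =>
    simp only [List.foldl_cons, List.flatMap_cons, List.count_append]
    rw [ih]
    simp only [contains_decStep, getD_decStep]
    push_cast
    ring

-- A's zero-check succeeds iff A is a permutation of the A-members among the pair elements
lemma zero_check_iff (A : List Int) (P : List (Int × Int)) :
    ((P.foldl decStep (PySem.Dict.counter A)).items.any (fun kv => !(kv.2 == 0)) = false)
    ↔ A.Perm (P.flatMap (fun p => [p.1, p.2].filter (fun x => A.contains x))) := by
  have hkeys : (P.foldl decStep (PySem.Dict.counter A)).keys = PySem.Set.ofList A := by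
    rw [keys_decLoop, PySem.Dict.keys_counter]
  have hnd : (P.foldl decStep (PySem.Dict.counter A)).keys.Nodup := by
    rw [keys_decLoop]; exact PySem.Dict.nodup_keys_counter A
  have hgetD : ∀ v, (P.foldl decStep (PySem.Dict.counter A)).getD v 0
      = (A.count v : Int) - ((P.flatMap (fun p => [p.1, p.2].filter (fun x => A.contains x))).count v : Int) := by
    intro v
    rw [getD_decLoop]
    simp only [PySem.Dict.contains_counter, PySem.Dict.getD_counter]
  rw [PySem.Dict.items_eq_map_keys _ hnd 0, hkeys, List.any_map, List.any_eq_false]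
  simp only [Function.comp, hgetD, Bool.not_eq_eq_eq_not, Bool.not_true, beq_eq_false_iff_ne,
    ne_eq, Decidable.not_not, sub_eq_zero, PySem.Set.mem_ofList]
  rw [List.perm_iff_count]
  constructor
  · intro h v
    by_cases hv : v ∈ A
    · exact_mod_cast h v hv
    · rw [List.count_eq_zero.2 hv, List.count_eq_zero.2 ?_]
      intro hmem
      rcases List.mem_flatMap.1 hmem with ⟨p, _, hp⟩
      exact hv (by simpa using (List.mem_filter.1 hp).2)
  · intro h v _
    exact_mod_cast congrArg (Nat.cast (R := Int)) (h v)

-- set(A) membership test = list membership test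
lemma set_contains_ofList (A : List Int) (x : Int) :
    (PySem.Set.ofList A).contains x = A.contains x := by
  simp [PySem.Set.contains, PySem.Set.mem_ofList]

-- ===== VERDICT (by name: the statement is the Claim_ definition above) =====
theorem pairing_solution_spec : Claim_equal_pairing_solution := by
  intro A P _
  unfold Spec_pairing_solution pairing_solution pairing_solution_alt
  cases P with
  | nil => rfl
  | cons p t =>
    have hlen : (((p :: t).length == 0) = false) := by simp
    simp only [hlen, Bool.false_eq_true, if_false]
    rw [count_loop_eq_counter]
    have hfold : ((p :: t).foldl (fun S q =>
        let S := if S.contains q.1 then S.insert q.1 ((S.get? q.1).getD 0 - 1) else S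
        if S.contains q.2 then S.insert q.2 ((S.get? q.2).getD 0 - 1) else S)
        (PySem.Dict.counter A)) = (p :: t).foldl decStep (PySem.Dict.counter A) := rfl
    rw [hfold]
    have hfB : ((p :: t).foldl (fun acc q =>
        acc ++ [q.1, q.2].filter (fun x => (PySem.Set.ofList A).contains x)) [])
        = (p :: t).flatMap (fun q => [q.1, q.2].filter (fun x => A.contains x)) := by
      rw [PySem.List.foldl_append_eq_flatMap]
      simp only [set_contains_ofList, List.nil_append]
    rw [hfB]
    have hb : ((p :: t).foldl decStep (PySem.Dict.counter A)).items.any (fun kv => !(kv.2 == 0))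
        = !((PySem.List.sorted A (fun x => x)) == (PySem.List.sorted ((p :: t).flatMap (fun q => [q.1, q.2].filter (fun x => A.contains x))) (fun x => x))) := by
      have h1 := zero_check_iff A (p :: t)
      have h2 : (((PySem.List.sorted A (fun x => x)) == (PySem.List.sorted ((p :: t).flatMap (fun q => [q.1, q.2].filter (fun x => A.contains x))) (fun x => x))) = true)
          ↔ A.Perm ((p :: t).flatMap (fun q => [q.1, q.2].filter (fun x => A.contains x))) := by
        rw [beq_iff_eq, PySem.List.sorted_id_eq_sorted_id_iff_perm]
      by_cases hperm : A.Perm ((p :: t).flatMap (fun q => [q.1, q.2].filter (fun x => A.contains x)))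
      · rw [h1.mpr hperm, h2.mpr hperm]; rfl
      · have hx : ¬(((p :: t).foldl decStep (PySem.Dict.counter A)).items.any (fun kv => !(kv.2 == 0)) = false) :=
          fun h => hperm (h1.mp h)
        have hy : ¬(((PySem.List.sorted A (fun x => x)) == (PySem.List.sorted ((p :: t).flatMap (fun q => [q.1, q.2].filter (fun x => A.contains x))) (fun x => x))) = true) :=
          fun h => hperm (h2.mp h)
        rw [Bool.not_eq_false] at hx
        rw [Bool.not_eq_true] at hy
        rw [hx, hy]; rfl
    rw [hb]
    have htail : (if ((p :: t).any (fun q => !((PySem.List.pyGetD (p :: t) 0 (0, 0)).1 + (PySem.List.pyGetD (p :: t) 0 (0, 0)).2 == q.1 + q.2)) = true) then false else true)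
        = (p :: t).all (fun q => q.1 + q.2 == (PySem.List.pyGetD (p :: t) 0 (0, 0)).1 + (PySem.List.pyGetD (p :: t) 0 (0, 0)).2) := by
      cases hA : (p :: t).any (fun q => !((PySem.List.pyGetD (p :: t) 0 (0, 0)).1 + (PySem.List.pyGetD (p :: t) 0 (0, 0)).2 == q.1 + q.2))
      · rw [if_neg (by simp)]
        rw [List.any_eq_false] at hA
        symm
        rw [List.all_eq_true]
        intro q hq
        have h := hA q hq
        rw [Bool.not_eq_true, Bool.not_eq_eq_eq_not, Bool.not_false, beq_iff_eq] at h
        rw [beq_iff_eq]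
        omega
      · rw [if_pos rfl]
        rw [List.any_eq_true] at hA
        obtain ⟨q, hq, hneq⟩ := hA
        symm
        rw [List.all_eq_false]
        refine ⟨q, hq, ?_⟩
        rw [Bool.not_eq_eq_eq_not, Bool.not_true, beq_eq_false_iff_ne] at hneq
        rw [beq_iff_eq]
        omega
    rw [htail]
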